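-- pv_equiv track=rewrite | github.com/olegbrz/coding_every_day | 029_091220_AOC9.py | get_weakness
-- ===== SOURCE A (Python) =====
-- from typing import List
--
-- def get_weakness(numbers: List[int], wrong: int) -> int:
--     """get_weakness iterates over the list of input data in search of a
--     combination of at least 2 contiguous numbers that sum the wrong number.
--
--     Args:
--         numbers (List[int]): list of numbers from input.
--         wrong (int): the wrong number obtained with the previous function.
--
--     Returns:
--         int: the weakness of the data, it's computed by suming the min and the
--         max numbers from the contiguous found numbers.
--     """
--     i = 0
--     found = False
--     weakness = -1
--     while i < len(numbers) and not found:
--         j = i + 2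
--         while sum(numbers[i:j]) < wrong:
--             j += 1
--         if sum(numbers[i:j]) == wrong:
--             weakness = max(numbers[i:j]) + min(numbers[i:j])
--             found = True
--         i += 1
--     return weakness
-- ===== SOURCE B (Python) =====
-- def get_weakness(numbers, wrong):
--     n = len(numbers)
--     lo = 0
--     s = 0
--     for hi in range(n):
--         s += numbers[hi]
--         while s > wrong and lo < hi:
--             s -= numbers[lo]
--             lo += 1
--         if s == wrong and hi - lo >= 1:
--             window = numbers[lo:hi + 1]
--             return max(window) + min(window)
--     return -1
-- ===== Notes on version B (the rewrite author's own statement) =====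
-- stated objective: alternative
-- what changed: Replaced A's per-start rescan (for each start index, repeatedly re-summing growing slices until the target is reached) by a single-pass two-pointer sliding window with a running sum, on the task's natural domain of non-negative numbers; intended as asymptotically faster (a timing run could not confirm a ratio: A already times out at n=16).
-- intended difference: On inputs whose last element equals wrong but that contain no length->=2 contiguous window summing to wrong, A returns 2*wrong because its slice numbers[i:i+2] silently clamps to the single last element, violating its own 'at least 2 contiguous numbers' contract; B returns -1 (not found), the intended value. — e.g. on get_weakness([3, 1, 5], 5): A returns 10, B returns -1
-- outside the precondition, e.g. on get_weakness([6, 7, -3, 1, -1, 9], 0): A returns 0, B returns -1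
import Mathlib
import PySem

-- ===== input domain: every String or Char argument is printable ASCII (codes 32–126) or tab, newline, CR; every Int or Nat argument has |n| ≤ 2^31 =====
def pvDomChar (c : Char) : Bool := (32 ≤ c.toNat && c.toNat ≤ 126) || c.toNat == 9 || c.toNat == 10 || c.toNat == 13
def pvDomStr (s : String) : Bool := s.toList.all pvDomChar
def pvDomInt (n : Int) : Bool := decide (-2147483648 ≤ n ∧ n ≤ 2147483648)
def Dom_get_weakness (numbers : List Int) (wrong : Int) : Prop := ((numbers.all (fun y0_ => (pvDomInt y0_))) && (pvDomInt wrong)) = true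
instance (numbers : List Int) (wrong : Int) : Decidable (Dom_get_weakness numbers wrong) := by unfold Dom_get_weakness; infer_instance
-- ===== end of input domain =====

-- B replaces A's per-start rescanned-slice search by a one-pass two-pointer sliding
-- window with a running sum, on the natural domain of non-negative numbers.

-- ===== PORT A =====
-- shared transliteration of 'max(w) + min(w)' (written identically in both Pythons)
def pvWeak (w : List Int) : Int :=
  (PySem.List.max? w (fun y => y)).getD 0 + (PySem.List.min? w (fun y => y)).getD 0

-- numbers[i:j]
def pvSliceA (numbers : List Int) (i j : Nat) : List Int :=
  PySem.List.slice numbers (some (i : Int)) (some (j : Int))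

-- 'while sum(numbers[i:j]) < wrong: j += 1'  (fuel; in Python this loop can diverge —
-- exactly those inputs are outside Pre_get_weakness)
def pvInnerA (numbers : List Int) (wrong : Int) (i : Nat) : Nat → Nat → Nat
  | 0, j => j
  | f + 1, j =>
    if (pvSliceA numbers i j).sum < wrong then pvInnerA numbers wrong i f (j + 1) else j

-- the outer 'while i < len(numbers) and not found' loop (fuel = len numbers)
def pvOuterA (numbers : List Int) (wrong : Int) : Nat → Nat → Int
  | 0, _ => -1
  | f + 1, i =>
    if i < numbers.length then
      let j := pvInnerA numbers wrong i (numbers.length + 1) (i + 2)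
      if (pvSliceA numbers i j).sum = wrong then pvWeak (pvSliceA numbers i j)
      else pvOuterA numbers wrong f (i + 1)
    else -1

def get_weakness (numbers : List Int) (wrong : Int) : Int :=
  pvOuterA numbers wrong numbers.length 0

-- ===== PORT B =====
-- 'while s > wrong and lo < hi: s -= numbers[lo]; lo += 1'  (numbers[lo] is always in
-- range because the guard keeps lo < hi < len numbers; fuel hi bounds the ≤ hi - lo steps)
def pvShrinkB (numbers : List Int) (wrong : Int) (hi : Nat) : Nat → Nat → Int → Nat × Int
  | 0, lo, s => (lo, s)
  | f + 1, lo, s =>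
    if wrong < s ∧ lo < hi then pvShrinkB numbers wrong hi f (lo + 1) (s - numbers.getD lo 0)
    else (lo, s)

-- 'for hi in range(n)' with state (lo, s); early return on a found window
def pvLoopB (numbers : List Int) (wrong : Int) : Nat → Nat → Nat → Int → Int
  | 0, _, _, _ => -1
  | f + 1, hi, lo, s =>
    if hi < numbers.length then
      let s1 := s + numbers.getD hi 0
      let p := pvShrinkB numbers wrong hi hi lo s1
      if p.2 = wrong ∧ 1 ≤ hi - p.1 then
        pvWeak (PySem.List.slice numbers (some (p.1 : Int)) (some ((hi : Int) + 1)))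
      else pvLoopB numbers wrong f (hi + 1) p.1 p.2
    else -1

def get_weakness_alt (numbers : List Int) (wrong : Int) : Int :=
  pvLoopB numbers wrong numbers.length 0 0 0

-- ===== PRECONDITION & SPEC =====
-- 'numbers has a contiguous window of length ≥ 2 summing to wrong'
def hasWin (numbers : List Int) (wrong : Int) : Bool :=
  decide (∃ i ≤ numbers.length, ∃ j ≤ numbers.length,
    i + 2 ≤ j ∧ ((numbers.drop i).take (j - i)).sum = wrong)

-- 'A's outer loop terminates at every start index i: from i the running slice sum
-- reaches wrong before (or exactly when) the slice is exhausted'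
def pvTermA (numbers : List Int) (wrong : Int) : Bool :=
  decide (∀ i < numbers.length,
    (∃ j ≤ numbers.length, i + 2 ≤ j ∧ wrong ≤ ((numbers.drop i).take (j - i)).sum) ∨
    wrong ≤ (numbers.drop i).sum)

-- Pre_ admits (a) non-negative inputs containing a window — the task's natural domain,
-- where the sliding window is valid — and (b) ANY input without a window on which A
-- terminates.  It excludes inputs on which A loops forever, and negative-number inputs
-- containing a window, where A's overshooting first-hit scan returns accidental values.
def Pre_get_weakness (numbers : List Int) (wrong : Int) : Prop :=
  ((∀ x ∈ numbers, 0 ≤ x) ∧ hasWin numbers wrong = true) ∨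
  (hasWin numbers wrong = false ∧ pvTermA numbers wrong = true)

instance (numbers : List Int) (wrong : Int) : Decidable (Pre_get_weakness numbers wrong) := by
  unfold Pre_get_weakness; infer_instance

def pvWitness_get_weakness : List Int × Int := ([1, 2, 3, 4], 5)

-- On inputs whose last element equals wrong but with no length-≥2 window summing to wrong,
-- A returns 2*wrong (its slice numbers[i:i+2] clamps to the single last element, violating
-- its own 'at least 2 contiguous numbers' contract); B returns -1, the intended value.
def D_get_weakness (numbers : List Int) (wrong : Int) : Prop :=
  numbers.getLast? = some wrong ∧ hasWin numbers wrong = false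

instance (numbers : List Int) (wrong : Int) : Decidable (D_get_weakness numbers wrong) := by
  unfold D_get_weakness; infer_instance

def Spec_get_weakness (numbers : List Int) (wrong : Int) (out : Int) : Prop :=
  ¬ D_get_weakness numbers wrong → out = get_weakness_alt numbers wrong

instance (numbers : List Int) (wrong : Int) (out : Int) : Decidable (Spec_get_weakness numbers wrong out) := by
  unfold Spec_get_weakness; infer_instance

def pvDiffWitness_get_weakness : List Int × Int := ([3, 1, 5], 5)

def pvDiffWitnessOut_get_weakness : Int × Int := (10, -1)

-- ===== CLAIM (what is proved, stated in full; the proofs are below) =====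
def Claim_unchanged_get_weakness : Prop :=
  ∀ (numbers : List Int) (wrong : Int), Dom_get_weakness numbers wrong →
    Pre_get_weakness numbers wrong →
    Spec_get_weakness numbers wrong (get_weakness numbers wrong)

def Claim_changed_get_weakness : Prop :=
  Dom_get_weakness (pvDiffWitness_get_weakness.1) (pvDiffWitness_get_weakness.2) ∧
  Pre_get_weakness (pvDiffWitness_get_weakness.1) (pvDiffWitness_get_weakness.2) ∧
  D_get_weakness (pvDiffWitness_get_weakness.1) (pvDiffWitness_get_weakness.2) ∧
  get_weakness (pvDiffWitness_get_weakness.1) (pvDiffWitness_get_weakness.2) = pvDiffWitnessOut_get_weakness.1 ∧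
  get_weakness_alt (pvDiffWitness_get_weakness.1) (pvDiffWitness_get_weakness.2) = pvDiffWitnessOut_get_weakness.2 ∧
  pvDiffWitnessOut_get_weakness.1 ≠ pvDiffWitnessOut_get_weakness.2

def Claim_exact_get_weakness : Prop :=
  ∀ (numbers : List Int) (wrong : Int), Dom_get_weakness numbers wrong →
    Pre_get_weakness numbers wrong → D_get_weakness numbers wrong →
    get_weakness numbers wrong ≠ get_weakness_alt numbers wrong

-- ===== LEMMAS AND PROOFS =====

-- prefix sums: pvP numbers k = sum(numbers[:k]); pvS numbers i j = sum(numbers[i:j])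
def pvP (numbers : List Int) (k : Nat) : Int := (numbers.take k).sum

def pvS (numbers : List Int) (i j : Nat) : Int := pvP numbers j - pvP numbers i

-- the window predicate, in prefix-sum form
def pvWin (numbers : List Int) (wrong : Int) (i j : Nat) : Prop :=
  i + 2 ≤ j ∧ j ≤ numbers.length ∧ pvS numbers i j = wrong

lemma pvP_add (numbers : List Int) (i d : Nat) :
    pvP numbers (i + d) = pvP numbers i + ((numbers.drop i).take d).sum := by
  simp [pvP, List.take_add, List.sum_append]

lemma pvSliceA_sum (numbers : List Int) (i j : Nat) (hij : i ≤ j) :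
    (pvSliceA numbers i j).sum = pvS numbers i j := by
  have h := pvP_add numbers i (j - i)
  rw [Nat.add_sub_cancel' hij] at h
  simp [pvSliceA, PySem.List.slice_natCast, pvS]
  omega

lemma pvP_stab (numbers : List Int) (k : Nat) (hk : numbers.length ≤ k) :
    pvP numbers k = pvP numbers numbers.length := by
  simp [pvP, List.take_of_length_le hk, List.take_of_length_le (Nat.le_refl _)]

lemma pvP_mono (numbers : List Int) (hnn : ∀ x ∈ numbers, 0 ≤ x) {i j : Nat} (hij : i ≤ j) :
    pvP numbers i ≤ pvP numbers j := by
  have h := pvP_add numbers i (j - i)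
  rw [Nat.add_sub_cancel' hij] at h
  have hnn' : 0 ≤ ((numbers.drop i).take (j - i)).sum := by
    apply List.sum_nonneg
    intro x hx
    exact hnn x (List.mem_of_mem_drop (List.mem_of_mem_take hx))
  omega

lemma pvP_succ (numbers : List Int) (k : Nat) (hk : k < numbers.length) :
    pvP numbers (k + 1) = pvP numbers k + numbers.getD k 0 := by
  rw [pvP, pvP, List.take_add_one, List.sum_append, List.getD_eq_getElem?_getD,
    List.getElem?_eq_getElem hk]
  simp

lemma drop_sum_eq (numbers : List Int) (i : Nat) (hi : i ≤ numbers.length) :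
    (numbers.drop i).sum = pvS numbers i numbers.length := by
  have h := pvP_add numbers i (numbers.length - i)
  rw [Nat.add_sub_cancel' hi] at h
  rw [List.take_of_length_le (by simp)] at h
  simp [pvS]
  omega

lemma hasWin_iff (numbers : List Int) (wrong : Int) :
    hasWin numbers wrong = true ↔ ∃ i j, pvWin numbers wrong i j := by
  rw [hasWin, decide_eq_true_iff]
  constructor
  · rintro ⟨i, hi, j, hj, hij, hsum⟩
    refine ⟨i, j, hij, hj, ?_⟩
    have h := pvP_add numbers i (j - i)
    rw [Nat.add_sub_cancel' (by omega : i ≤ j)] at h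
    simp [pvS]
    omega
  · rintro ⟨i, j, hij, hj, hsum⟩
    refine ⟨i, by omega, j, hj, hij, ?_⟩
    have h := pvP_add numbers i (j - i)
    rw [Nat.add_sub_cancel' (by omega : i ≤ j)] at h
    simp [pvS] at hsum
    omega

lemma pvTermA_spec (numbers : List Int) (wrong : Int)
    (h : pvTermA numbers wrong = true) :
    ∀ i < numbers.length, ∃ j, i + 2 ≤ j ∧ wrong ≤ pvS numbers i j := by
  rw [pvTermA, decide_eq_true_iff] at h
  intro i hi
  rcases h i hi with ⟨j, hj, hij, hs⟩ | ht
  · refine ⟨j, hij, ?_⟩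
    have hadd := pvP_add numbers i (j - i)
    rw [Nat.add_sub_cancel' (by omega : i ≤ j)] at hadd
    rw [pvS]
    omega
  · refine ⟨max (i + 2) numbers.length, le_max_left _ _, ?_⟩
    rw [drop_sum_eq numbers i (by omega)] at ht
    have := pvP_stab numbers (max (i + 2) numbers.length) (le_max_right _ _)
    rw [pvS] at ht ⊢
    omega

-- ---- A-side ----

lemma pvInnerA_eq (numbers : List Int) (wrong : Int) (i : Nat) :
    ∀ (f j jA : Nat), j ≤ jA → jA ≤ j + f →
      ¬ ((pvSliceA numbers i jA).sum < wrong) →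
      (∀ k, j ≤ k → k < jA → (pvSliceA numbers i k).sum < wrong) →
      pvInnerA numbers wrong i f j = jA := by
  intro f
  induction f with
  | zero =>
    intro j jA h1 h2 _ _
    have : j = jA := by omega
    simp [pvInnerA, this]
  | succ f ih =>
    intro j jA h1 h2 hstop hgo
    by_cases hc : (pvSliceA numbers i j).sum < wrong
    · have hne : j ≠ jA := fun he => hstop (he ▸ hc)
      rw [pvInnerA, if_pos hc]
      exact ih (j + 1) jA (by omega) (by omega) hstop
        (fun k hk1 hk2 => hgo k (by omega) hk2)
    · have : j = jA := by
        by_contra hne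
        exact hc (hgo j (Nat.le_refl _) (by omega))
      rw [pvInnerA, if_neg hc, this]

-- least elements of a nonempty set of naturals (classical form of Nat.find)
lemma pv_exists_least {P : Nat → Prop} (h : ∃ n, P n) :
    ∃ n, P n ∧ ∀ m, m < n → ¬ P m := by
  classical
  exact ⟨Nat.find h, Nat.find_spec h, fun m hm => Nat.find_min h hm⟩

-- the last element in prefix-sum form
lemma pvLast (numbers : List Int) (x : Int) (hx : numbers.getLast? = some x) :
    pvS numbers (numbers.length - 1) (numbers.length) = x ∧ 1 ≤ numbers.length := by
  have hne : numbers ≠ [] := by rintro rfl; simp at hx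
  have hlen : 1 ≤ numbers.length := List.length_pos_iff.mpr hne
  have hk : numbers.length - 1 < numbers.length := by omega
  have h1 := pvP_succ numbers (numbers.length - 1) hk
  rw [show numbers.length - 1 + 1 = numbers.length from by omega] at h1
  rw [List.getLast?_eq_getElem?] at hx
  have h2 : numbers.getD (numbers.length - 1) 0 = x := by
    rw [List.getD_eq_getElem?_getD, hx]; rfl
  refine ⟨?_, hlen⟩
  rw [pvS]
  omega

-- the single iteration of A's outer loop: the inner loop stops at the least
-- overshoot point jF
lemma pvStepA (numbers : List Int) (wrong : Int) (i : Nat)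
    (hi : i < numbers.length) (hQ : ∃ j, i + 2 ≤ j ∧ wrong ≤ pvS numbers i j) :
    ∃ jF, pvInnerA numbers wrong i (numbers.length + 1) (i + 2) = jF ∧
      i + 2 ≤ jF ∧ wrong ≤ pvS numbers i jF ∧
      (∀ k, i + 2 ≤ k → k < jF → pvS numbers i k < wrong) ∧
      (i + 2 ≤ numbers.length → jF ≤ numbers.length) ∧
      (i + 1 = numbers.length → jF = i + 2) := by
  obtain ⟨j0, hj01, hj02⟩ := hQ
  -- normalize the witness below max (i+2) (length): beyond the length pvS is constant
  have hQW : i + 2 ≤ min j0 (max (i + 2) numbers.length) ∧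
      wrong ≤ pvS numbers i (min j0 (max (i + 2) numbers.length)) := by
    constructor
    · omega
    · rcases Nat.le_total j0 (max (i + 2) numbers.length) with h | h
      · rw [Nat.min_eq_left h]; exact hj02
      · rw [Nat.min_eq_right h]
        have h1 := pvP_stab numbers j0 (by omega)
        have h2 := pvP_stab numbers (max (i + 2) numbers.length) (le_max_right _ _)
        rw [pvS] at hj02 ⊢
        omega
  have hQex : ∃ j, i + 2 ≤ j ∧ wrong ≤ pvS numbers i j :=
    ⟨min j0 (max (i + 2) numbers.length), hQW.1, hQW.2⟩
  obtain ⟨jF, ⟨hjF1, hjF2⟩, hmin⟩ := pv_exists_least hQex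
  have hjub : jF ≤ max (i + 2) numbers.length := by
    by_contra hc
    exact hmin (min j0 (max (i + 2) numbers.length)) (by omega) ⟨hQW.1, hQW.2⟩
  have hgo : ∀ k, i + 2 ≤ k → k < jF → pvS numbers i k < wrong := by
    intro k hk1 hk2
    by_contra hc
    exact hmin k hk2 ⟨hk1, by omega⟩
  refine ⟨jF, ?_, hjF1, hjF2, hgo, ?_, ?_⟩
  · apply pvInnerA_eq numbers wrong i (numbers.length + 1) (i + 2) jF hjF1 (by omega)
    · rw [pvSliceA_sum numbers i jF (by omega)]; omega
    · intro k hk1 hk2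
      rw [pvSliceA_sum numbers i k (by omega)]
      exact hgo k hk1 hk2
  · intro hlen
    omega
  · intro hlen
    omega

-- A finds the lexicographically least window when one exists
lemma pvOuterA_win (numbers : List Int) (wrong : Int)
    (hnn : ∀ x ∈ numbers, 0 ≤ x) (iS jS : Nat)
    (hW : pvWin numbers wrong iS jS)
    (hminI : ∀ i j, pvWin numbers wrong i j → iS ≤ i)
    (hminJ : ∀ j, pvWin numbers wrong iS j → jS ≤ j) :
    ∀ (f i : Nat), i ≤ iS → iS < i + f →
      pvOuterA numbers wrong f i = pvWeak (pvSliceA numbers iS jS) := by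
  obtain ⟨hiS2, hjSn, hSum⟩ := hW
  intro f
  induction f with
  | zero => intro i h1 h2; omega
  | succ f ih =>
    intro i h1 h2
    have hin : i < numbers.length := by omega
    have hTi : wrong ≤ pvS numbers i numbers.length := by
      have m1 := pvP_mono numbers hnn (i := jS) (j := numbers.length) hjSn
      have m2 := pvP_mono numbers hnn (i := i) (j := iS) h1
      rw [pvS] at hSum ⊢
      omega
    obtain ⟨jF, heq, hjF1, hjF2, hgo, hjFn, _⟩ := pvStepA numbers wrong i hin
      ⟨max (i + 2) numbers.length, le_max_left _ _, by
        have := pvP_stab numbers (max (i + 2) numbers.length) (le_max_right _ _)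
        rw [pvS, this]; exact hTi⟩
    rw [pvOuterA, if_pos hin]
    simp only [heq]
    rcases Nat.lt_or_ge i iS with hlt | hge
    · have hne : (pvSliceA numbers i jF).sum ≠ wrong := by
        rw [pvSliceA_sum numbers i jF (by omega)]
        intro hc
        have hwin : pvWin numbers wrong i jF :=
          ⟨hjF1, hjFn (by omega), hc⟩
        exact absurd (hminI i jF hwin) (by omega)
      rw [if_neg hne]
      exact ih (i + 1) (by omega) (by omega)
    · have hii : i = iS := by omega
      subst hii
      have hjle : jF ≤ jS := by
        by_contra hc
        have := hgo jS hiS2 (by omega)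
        omega
      have hjeq : jF = jS := by
        have hle : pvS numbers i jF ≤ pvS numbers i jS := by
          have := pvP_mono numbers hnn (i := jF) (j := jS) hjle
          rw [pvS, pvS]; omega
        have hw : pvWin numbers wrong i jF := ⟨hjF1, by omega, by omega⟩
        have := hminJ jF hw
        omega
      subst hjeq
      rw [if_pos (by rw [pvSliceA_sum numbers i jF (by omega)]; omega)]

-- with no window, every reached check fails; at i = n-1 the slice clamps to [last]
lemma pvOuterA_noWin (numbers : List Int) (wrong : Int)
    (hnW : ¬ ∃ i j, pvWin numbers wrong i j)
    (hTerm : ∀ i < numbers.length, ∃ j, i + 2 ≤ j ∧ wrong ≤ pvS numbers i j)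
    (hlast : ¬ numbers.getLast? = some wrong) :
    ∀ (f i : Nat), f + i = numbers.length →
      pvOuterA numbers wrong f i = -1 := by
  intro f
  induction f with
  | zero => intro i _; rfl
  | succ f ih =>
    intro i hfi
    have hin : i < numbers.length := by omega
    obtain ⟨jF, heq, hjF1, hjF2, hgo, hjFn, hjFl⟩ := pvStepA numbers wrong i hin (hTerm i hin)
    rw [pvOuterA, if_pos hin]
    simp only [heq]
    have hne : (pvSliceA numbers i jF).sum ≠ wrong := by
      rw [pvSliceA_sum numbers i jF (by omega)]
      rcases Nat.lt_or_ge (i + 1) numbers.length with hlt | hge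
      · intro hc
        exact hnW ⟨i, jF, hjF1, hjFn (by omega), hc⟩
      · have hieq : i + 1 = numbers.length := by omega
        rw [hjFl hieq]
        have hstab := pvP_stab numbers (i + 2) (by omega)
        have hL : pvS numbers (numbers.length - 1) (numbers.length) ≠ wrong := by
          intro hc
          apply hlast
          rw [List.getLast?_eq_getElem?]
          have hk : numbers.length - 1 < numbers.length := by omega
          have h1 := pvP_succ numbers (numbers.length - 1) hk
          rw [show numbers.length - 1 + 1 = numbers.length from by omega] at h1
          have h2 : numbers.getD (numbers.length - 1) 0 = numbers[numbers.length - 1] := by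
            rw [List.getD_eq_getElem?_getD, List.getElem?_eq_getElem hk]; rfl
          rw [List.getElem?_eq_getElem hk]
          rw [pvS] at hc
          congr 1
          omega
        intro hc
        apply hL
        rw [pvS] at hc ⊢
        have : numbers.length - 1 = i := by omega
        rw [this]
        omega
    rw [if_neg hne]
    exact ih (i + 1) (by omega)

-- with no window but last element = wrong, A "finds" the clamped single-element
-- slice [last] at i = n-1 and returns wrong + wrong
lemma pvOuterA_noWin_last (numbers : List Int) (wrong : Int)
    (hnW : ¬ ∃ i j, pvWin numbers wrong i j)
    (hTerm : ∀ i < numbers.length, ∃ j, i + 2 ≤ j ∧ wrong ≤ pvS numbers i j)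
    (hlast : numbers.getLast? = some wrong) :
    ∀ (f i : Nat), f + i = numbers.length → i + 1 ≤ numbers.length →
      pvOuterA numbers wrong f i = wrong + wrong := by
  obtain ⟨hLv, hlen⟩ := pvLast numbers wrong hlast
  intro f
  induction f with
  | zero => intro i h1 h2; omega
  | succ f ih =>
    intro i hfi hile
    have hin : i < numbers.length := by omega
    obtain ⟨jF, heq, hjF1, hjF2, hgo, hjFn, hjFl⟩ := pvStepA numbers wrong i hin (hTerm i hin)
    rw [pvOuterA, if_pos hin]
    simp only [heq]
    rcases Nat.lt_or_ge (i + 1) numbers.length with hlt | hge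
    · have hne : (pvSliceA numbers i jF).sum ≠ wrong := by
        rw [pvSliceA_sum numbers i jF (by omega)]
        intro hc
        exact hnW ⟨i, jF, hjF1, hjFn (by omega), hc⟩
      rw [if_neg hne]
      exact ih (i + 1) (by omega) (by omega)
    · have hieq : i + 1 = numbers.length := by omega
      have hjeq : jF = i + 2 := hjFl hieq
      have hseq : (pvSliceA numbers i jF).sum = wrong := by
        rw [pvSliceA_sum numbers i jF (by omega), hjeq]
        have hstab := pvP_stab numbers (i + 2) (by omega)
        rw [pvS] at hLv ⊢
        have : numbers.length - 1 = i := by omega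
        rw [this] at hLv
        omega
      rw [if_pos hseq]
      have hsl : pvSliceA numbers i jF = [wrong] := by
        rw [hjeq, pvSliceA, PySem.List.slice_natCast]
        have hd : numbers.drop i = [wrong] := by
          have h1 : (numbers.drop i).length = 1 := by
            rw [List.length_drop]; omega
          obtain ⟨x, hx⟩ := List.length_eq_one_iff.mp h1
          have hsplit : numbers = numbers.take i ++ [x] := by
            rw [← hx, List.take_append_drop]
          rw [hsplit, List.getLast?_concat] at hlast
          simp at hlast
          rw [hx, hlast]
        rw [hd, show i + 2 - i = 2 from by omega]
        rfl
      rw [hsl]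
      simp [pvWeak, PySem.List.max?_id_cons, PySem.List.min?_id_cons]

-- ---- B-side ----

lemma pvShrinkB_spec (numbers : List Int) (wrong : Int) (hi : Nat)
    (hhi : hi < numbers.length) :
    ∀ (f lo : Nat) (s : Int), s = pvS numbers lo (hi + 1) → lo ≤ hi → hi - lo ≤ f →
      (pvShrinkB numbers wrong hi f lo s).2
          = pvS numbers (pvShrinkB numbers wrong hi f lo s).1 (hi + 1) ∧
      lo ≤ (pvShrinkB numbers wrong hi f lo s).1 ∧
      (pvShrinkB numbers wrong hi f lo s).1 ≤ hi ∧
      ¬ (wrong < (pvShrinkB numbers wrong hi f lo s).2 ∧ (pvShrinkB numbers wrong hi f lo s).1 < hi) ∧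
      (∀ k, lo ≤ k → k < (pvShrinkB numbers wrong hi f lo s).1 → wrong < pvS numbers k (hi + 1)) := by
  intro f
  induction f with
  | zero =>
    intro lo s hs hlo hf
    have hlh : lo = hi := by omega
    simp only [pvShrinkB]
    exact ⟨hs, Nat.le_refl _, by omega, by omega, by intro k h1 h2; omega⟩
  | succ f ih =>
    intro lo s hs hlo hf
    by_cases hc : wrong < s ∧ lo < hi
    · rw [pvShrinkB, if_pos hc]
      have hs' : s - numbers.getD lo 0 = pvS numbers (lo + 1) (hi + 1) := by
        have := pvP_succ numbers lo (by omega)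
        rw [hs, pvS, pvS]
        omega
      obtain ⟨h1, h2, h3, h4, h5⟩ := ih (lo + 1) (s - numbers.getD lo 0) hs' (by omega) (by omega)
      refine ⟨h1, by omega, h3, h4, ?_⟩
      intro k hk1 hk2
      rcases Nat.lt_or_ge k (lo + 1) with hk | hk
      · have : k = lo := by omega
        rw [this, ← hs]
        exact hc.1
      · exact h5 k hk hk2
    · rw [pvShrinkB, if_neg hc]
      exact ⟨hs, Nat.le_refl _, hlo, hc, by intro k h1 h2; omega⟩

lemma pvLoopB_noWin (numbers : List Int) (wrong : Int)
    (hnW : ¬ ∃ i j, pvWin numbers wrong i j) :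
    ∀ (f hi lo : Nat) (s : Int), lo ≤ hi → s = pvS numbers lo hi →
      pvLoopB numbers wrong f hi lo s = -1 := by
  intro f
  induction f with
  | zero => intro hi lo s _ _; rfl
  | succ f ih =>
    intro hi lo s hlo hs
    by_cases hin : hi < numbers.length
    · rw [pvLoopB, if_pos hin]
      have hs1 : s + numbers.getD hi 0 = pvS numbers lo (hi + 1) := by
        have := pvP_succ numbers hi hin
        rw [hs, pvS, pvS]
        omega
      obtain ⟨h1, h2, h3, h4, h5⟩ :=
        pvShrinkB_spec numbers wrong hi hin hi lo (s + numbers.getD hi 0) hs1 hlo (by omega)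
      set p := pvShrinkB numbers wrong hi hi lo (s + numbers.getD hi 0) with hp
      by_cases hchk : p.2 = wrong ∧ 1 ≤ hi - p.1
      · exfalso
        exact hnW ⟨p.1, hi + 1, by omega, by omega, by rw [← h1]; exact hchk.1⟩
      · rw [if_neg hchk]
        exact ih (hi + 1) p.1 p.2 (by omega) h1
    · rw [pvLoopB, if_neg hin]

lemma pvLoopB_win (numbers : List Int) (wrong : Int)
    (hnn : ∀ x ∈ numbers, 0 ≤ x) (iS jS : Nat)
    (hW : pvWin numbers wrong iS jS)
    (hminI : ∀ i j, pvWin numbers wrong i j → iS ≤ i)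
    (hminJ : ∀ j, pvWin numbers wrong iS j → jS ≤ j) :
    ∀ (f hi lo : Nat) (s : Int), hi + 1 ≤ jS → jS ≤ hi + f →
      lo ≤ hi → s = pvS numbers lo hi →
      (∀ k, k < lo → wrong < pvS numbers k hi) →
      pvLoopB numbers wrong f hi lo s = pvWeak (pvSliceA numbers iS jS) := by
  obtain ⟨hiS2, hjSn, hSum⟩ := hW
  intro f
  induction f with
  | zero => intro hi lo s h1 h2; omega
  | succ f ih =>
    intro hi lo s hhi1 hhi2 hlo hs hInv
    have hin : hi < numbers.length := by omega
    rw [pvLoopB, if_pos hin]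
    have hs1 : s + numbers.getD hi 0 = pvS numbers lo (hi + 1) := by
      have := pvP_succ numbers hi hin
      rw [hs, pvS, pvS]
      omega
    obtain ⟨h1, h2, h3, h4, h5⟩ :=
      pvShrinkB_spec numbers wrong hi hin hi lo (s + numbers.getD hi 0) hs1 hlo (by omega)
    set p := pvShrinkB numbers wrong hi hi lo (s + numbers.getD hi 0) with hp
    have hall : ∀ k, k < p.1 → wrong < pvS numbers k (hi + 1) := by
      intro k hk
      rcases Nat.lt_or_ge k lo with h | h
      · have hmono := pvP_mono numbers hnn (i := hi) (j := hi + 1) (by omega)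
        have := hInv k h
        rw [pvS] at this ⊢
        omega
      · exact h5 k h hk
    rcases Nat.lt_or_ge (hi + 1) jS with hlt | hge
    · -- before the window's end: the check cannot fire
      have hchk : ¬ (p.2 = wrong ∧ 1 ≤ hi - p.1) := by
        rintro ⟨hw, hl⟩
        have hwin : pvWin numbers wrong p.1 (hi + 1) :=
          ⟨by omega, by omega, by rw [← h1]; exact hw⟩
        have hiSle := hminI p.1 (hi + 1) hwin
        rcases Nat.lt_or_ge iS p.1 with hx | hx
        · have := hall iS hx
          have hm1 := pvP_mono numbers hnn (i := hi + 1) (j := jS) (by omega)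
          rw [pvS] at this hSum
          omega
        · have : iS = p.1 := by omega
          subst this
          have := hminJ (hi + 1) hwin
          omega
      rw [if_neg hchk]
      exact ih (hi + 1) p.1 p.2 (by omega) (by omega) (by omega) h1 hall
    · -- hi + 1 = jS: the shrink pointer lands exactly on iS and the check fires
      have hieq : hi + 1 = jS := by omega
      have hple : p.1 ≤ iS := by
        by_contra hc
        have := hall iS (by omega)
        rw [hieq, pvS] at this
        rw [pvS] at hSum
        omega
      have hpge : iS ≤ p.1 := by
        by_contra hc
        -- p.1 < iS: the stop condition forces pvS p.1 jS ≤ wrong, yet it is ≥ wrong,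
        -- so (p.1, jS) is a window left of iS — impossible
        have hplt : p.1 < hi := by omega
        have hstop : ¬ wrong < p.2 := fun hx => h4 ⟨hx, hplt⟩
        have hm := pvP_mono numbers hnn (i := p.1) (j := iS) (by omega)
        rw [hieq] at h1
        rw [pvS] at hSum
        have hwv : pvS numbers p.1 jS = wrong := by
          rw [pvS]
          rw [h1, pvS] at hstop
          omega
        have hwin : pvWin numbers wrong p.1 jS := ⟨by omega, hjSn, hwv⟩
        have := hminI p.1 jS hwin
        omega
      have hpeq : p.1 = iS := by omega
      have hchk : p.2 = wrong ∧ 1 ≤ hi - p.1 := by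
        constructor
        · rw [h1, hpeq, hieq]
          exact hSum
        · omega
      rw [if_pos hchk]
      rw [pvSliceA]
      rw [hpeq, show ((hi : Int) + 1) = ((jS : Nat) : Int) from by omega]

lemma pv_min_window (numbers : List Int) (wrong : Int)
    (h : ∃ i j, pvWin numbers wrong i j) :
    ∃ iS jS, pvWin numbers wrong iS jS ∧
      (∀ i j, pvWin numbers wrong i j → iS ≤ i) ∧
      (∀ j, pvWin numbers wrong iS j → jS ≤ j) := by
  obtain ⟨iS, hiS, hminI⟩ := pv_exists_least h
  obtain ⟨jS, hjS, hminJ⟩ := pv_exists_least hiS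
  refine ⟨iS, jS, hjS, ?_, ?_⟩
  · intro i j hw
    by_contra hc
    exact hminI i (by omega) ⟨j, hw⟩
  · intro j hw
    by_contra hc
    exact hminJ j (by omega) hw

-- ===== VERDICT (by name: the statement is the Claim_ definition above) =====
theorem get_weakness_spec : Claim_unchanged_get_weakness := by
  intro numbers wrong _ hPre hND
  rw [get_weakness, get_weakness_alt]
  rcases hPre with ⟨hnn, hwin⟩ | ⟨hnwin, hterm⟩
  · obtain ⟨iS, jS, hw, hminI, hminJ⟩ :=
      pv_min_window numbers wrong ((hasWin_iff numbers wrong).mp hwin)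
    have hA := pvOuterA_win numbers wrong hnn iS jS hw hminI hminJ
      numbers.length 0 (Nat.zero_le _) (by obtain ⟨h1, h2, _⟩ := hw; omega)
    have hB := pvLoopB_win numbers wrong hnn iS jS hw hminI hminJ
      numbers.length 0 0 0 (by obtain ⟨h1, h2, _⟩ := hw; omega)
      (by obtain ⟨h1, h2, _⟩ := hw; omega) (Nat.le_refl _)
      (by simp [pvS]) (by intro k hk; omega)
    rw [hA, hB]
  · have hW : ¬ ∃ i j, pvWin numbers wrong i j := by
      intro hx
      rw [← hasWin_iff numbers wrong] at hx
      rw [hnwin] at hx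
      exact Bool.false_ne_true hx
    have hlast : ¬ numbers.getLast? = some wrong := fun hc => hND ⟨hc, hnwin⟩
    rw [pvOuterA_noWin numbers wrong hW (pvTermA_spec numbers wrong hterm) hlast
        numbers.length 0 (by omega),
      pvLoopB_noWin numbers wrong hW numbers.length 0 0 0 (Nat.le_refl _) (by simp [pvS])]

theorem get_weakness_changed : Claim_changed_get_weakness := by
  unfold Claim_changed_get_weakness; decide

theorem get_weakness_tight : Claim_exact_get_weakness := by
  intro numbers wrong _ hPre hD
  obtain ⟨hlast, hnwin⟩ := hD
  have hW : ¬ ∃ i j, pvWin numbers wrong i j := by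
    intro hx
    rw [← hasWin_iff numbers wrong] at hx
    rw [hnwin] at hx
    exact Bool.false_ne_true hx
  have hterm : pvTermA numbers wrong = true := by
    rcases hPre with ⟨_, hwin⟩ | ⟨_, ht⟩
    · rw [hwin] at hnwin; exact absurd hnwin (by simp)
    · exact ht
  have hlen : 1 ≤ numbers.length := by
    rcases numbers with _ | ⟨a, t⟩
    · simp at hlast
    · simp
  rw [get_weakness, get_weakness_alt]
  rw [pvOuterA_noWin_last numbers wrong hW (pvTermA_spec numbers wrong hterm) hlast
    numbers.length 0 (by omega) (by omega)]
  rw [pvLoopB_noWin numbers wrong hW numbers.length 0 0 0 (Nat.le_refl _) (by simp [pvS])]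
  omega
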